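-- pv_equiv track=rewrite | github.com/banillie/Portfolio_milestones | milestone_comparison_3_quarters_ind.py | longest_list
-- ===== SOURCE A (Python) =====
-- def longest_list(one, two, three):
--     list_list = [one, two, three]
--     a = len(one)
--     b = len(two)
--     c = len(three)
--
--     out = [a,b,c]
--     out.sort()
--     for x in list_list:
--         if out[-1] == len(x):
--             return x
-- ===== SOURCE B (Python) =====
-- def longest_list(one, two, three):
--     return max((one, two, three), key=len)
-- ===== Notes on version B (the rewrite author's own statement) =====
-- stated objective: idiomatic
-- what changed: Replaces the build-a-lengths-list, sort, then rescan-for-the-matching-length approach with a single max(..., key=len) selection; first-wins tie-breaking is preserved because max returns the first argument achieving the maximal key.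
import Mathlib
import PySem

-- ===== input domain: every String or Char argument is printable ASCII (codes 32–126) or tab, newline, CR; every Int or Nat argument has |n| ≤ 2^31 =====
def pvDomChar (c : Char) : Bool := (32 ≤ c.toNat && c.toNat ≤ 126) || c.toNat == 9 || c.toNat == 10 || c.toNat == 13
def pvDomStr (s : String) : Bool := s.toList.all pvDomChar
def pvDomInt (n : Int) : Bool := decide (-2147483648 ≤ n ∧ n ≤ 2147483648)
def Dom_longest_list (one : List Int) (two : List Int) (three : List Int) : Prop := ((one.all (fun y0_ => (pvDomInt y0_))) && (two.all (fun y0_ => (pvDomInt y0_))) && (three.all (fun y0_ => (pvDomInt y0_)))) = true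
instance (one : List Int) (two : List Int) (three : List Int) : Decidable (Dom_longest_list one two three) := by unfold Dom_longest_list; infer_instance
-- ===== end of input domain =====

-- B replaces A's sort-the-lengths-then-rescan with a single first-wins max(key=len) selection (idiomatic; same cost).

-- ===== PORT A =====
-- the 'for x in list_list: if out[-1] == len(x): return x' loop; Python returns None
-- when no element matches (unreachable here — the max of the lengths is one of them); [] stands for that fall-through
def longest_list_scan (m : Int) : List (List Int) → List Int
  | [] => []
  | x :: rest => if m = (x.length : Int) then x else longest_list_scan m rest

def longest_list (one : List Int) (two : List Int) (three : List Int) : List Int :=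
  let list_list : List (List Int) := [one, two, three]
  let a : Int := one.length
  let b : Int := two.length
  let c : Int := three.length
  let out : List Int := PySem.List.sorted [a, b, c] (fun x => x)
  -- out[-1]; out has three elements, so pyGet? is some
  let last : Int := (PySem.List.pyGet? out (-1)).getD 0
  longest_list_scan last list_list

-- ===== PORT B =====
def longest_list_alt (one : List Int) (two : List Int) (three : List Int) : List Int :=
  -- max((one, two, three), key=len); the iterable is nonempty so max? is some
  (PySem.List.max? [one, two, three] (fun x => (x.length : Int))).getD []

-- ===== PRECONDITION & SPEC =====
def Spec_longest_list (one : List Int) (two : List Int) (three : List Int) (out : List Int) : Prop := out = longest_list_alt one two three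
instance (one : List Int) (two : List Int) (three : List Int) (out : List Int) : Decidable (Spec_longest_list one two three out) := by unfold Spec_longest_list; infer_instance

-- ===== CLAIM (what is proved, stated in full; the proofs are below) =====
def Claim_equal_longest_list : Prop := ∀ (one : List Int) (two : List Int) (three : List Int), Dom_longest_list one two three → Spec_longest_list one two three (longest_list one two three)

-- ===== LEMMAS AND PROOFS =====
-- out[-1] of the sorted length list is the maximum of the three lengths
theorem max_sorted3 (a b c : Int) :
    (PySem.List.pyGet? (PySem.List.sorted [a, b, c] (fun x => x)) (-1)).getD 0 = max a (max b c) := by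
  by_cases h1 : b < a <;> by_cases h2 : c < a <;> by_cases h3 : c < b <;>
    simp [PySem.List.sorted, PySem.List.insertBy, h1, h2, h3,
      PySem.List.pyGet?, PySem.List.pyIdx?] <;> omega

-- ===== VERDICT (by name: the statement is the Claim_ definition above) =====
theorem longest_list_spec : Claim_equal_longest_list := by
  intro one two three _
  unfold Spec_longest_list longest_list longest_list_alt
  simp only [max_sorted3]
  by_cases h1 : (one.length : Int) < (two.length : Int) <;>
    by_cases h2 : (two.length : Int) < (three.length : Int) <;>
      by_cases h3 : (one.length : Int) < (three.length : Int) <;>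
        simp [PySem.List.max?, longest_list_scan, h1, h2, h3] <;>
          split_ifs <;> simp_all <;>
            first
              | omega
              | (split_ifs <;> simp_all <;> omega)
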